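-- pv_equiv track=rewrite | github.com/junsoopablo/L1-m6A-polyA | analysis/topic_08_sequence_features/stress_resilience_sequence_features.py | count_motif
-- ===== SOURCE A (Python) =====
-- def count_motif(seq, motif):
--     """Count occurrences of motif in sequence (RNA motifs converted to DNA)."""
--     # Convert RNA motif to DNA
--     dna_motif = motif.replace('U', 'T')
--     seq_upper = seq.upper()
--
--     # Handle IUPAC codes
--     if 'N' in dna_motif:
--         count = 0
--         for i in range(len(seq_upper) - len(dna_motif) + 1):
--             match = True
--             for j, c in enumerate(dna_motif):
--                 if c == 'N':
--                     continue
--                 if seq_upper[i+j] != c: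
--                     match = False
--                     break
--             if match:
--                 count += 1
--         return count
--     else:
--         count = 0
--         start = 0
--         while True:
--             pos = seq_upper.find(dna_motif, start)
--             if pos == -1:
--                 break
--             count += 1
--             start = pos + 1
--         return count
-- ===== SOURCE B (Python) =====
-- def count_motif(seq, motif):
--     """Count occurrences of motif in sequence (RNA motifs converted to DNA)."""
--     dna_motif = motif.replace('U', 'T')
--     seq_upper = seq.upper()
--     count = 0
--     for i in range(len(seq_upper) - len(dna_motif) + 1):
--         if all(c == 'N' or seq_upper[i + j] == c for j, c in enumerate(dna_motif)):
--             count += 1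
--     return count
-- ===== Notes on version B (the rewrite author's own statement) =====
-- stated objective: simpler
-- what changed: A's two-branch code (an overlapping str.find/while loop for plain motifs, a separate nested scan for motifs containing N) is replaced by a single uniform sliding-window scan that treats 'N' as a wildcard everywhere.
import Mathlib
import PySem

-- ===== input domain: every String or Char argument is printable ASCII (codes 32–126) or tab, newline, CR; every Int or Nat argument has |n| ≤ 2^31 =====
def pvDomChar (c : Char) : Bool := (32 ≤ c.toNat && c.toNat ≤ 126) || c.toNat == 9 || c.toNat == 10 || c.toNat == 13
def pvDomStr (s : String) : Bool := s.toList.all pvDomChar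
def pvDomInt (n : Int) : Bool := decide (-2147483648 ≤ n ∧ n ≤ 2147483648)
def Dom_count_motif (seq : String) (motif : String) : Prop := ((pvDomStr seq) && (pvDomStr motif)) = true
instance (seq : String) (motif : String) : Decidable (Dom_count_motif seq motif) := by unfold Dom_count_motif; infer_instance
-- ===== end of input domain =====

-- B replaces A's two-branch code (str.find overlapping-search loop vs N-wildcard scan) with ONE uniform sliding-window scan; objective: simpler.

-- ===== PORT A =====
-- inner 'for j, c in enumerate(dna_motif)' loop with continue/break, returning the final 'match'
def pvInnerA (s : List Char) (i : Int) : List (Int × Char) → Bool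
  | [] => true
  | (j, c) :: rest =>
    if c = 'N' then pvInnerA s i rest
    else if ¬ (PySem.List.pyGet? s (i + j) = some c) then false
    else pvInnerA s i rest

-- quirk of str.find: a start past len(s) yields -1 (needed by the loop's termination proof)
theorem pvFindFrom_past (s dm : List Char) (start : Nat) (h : s.length < start) :
    PySem.Chars.findFrom s dm (start : Int) none = -1 := by
  simp only [PySem.Chars.findFrom]
  have h0 : ¬ ((start : Int) < 0) := by omega
  have h1 : ((s.length : Int) < (start : Int)) := by omega
  simp [h0, h1]

theorem pvFindFrom_bounds (s dm : List Char) (start : Nat)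
    (h : PySem.Chars.findFrom s dm (start : Int) none ≠ -1) :
    start ≤ (PySem.Chars.findFrom s dm (start : Int) none).toNat ∧
      (PySem.Chars.findFrom s dm (start : Int) none).toNat ≤ s.length := by
  rcases (by omega : start ≤ s.length ∨ s.length < start) with hle | hgt
  · have heq := PySem.Chars.findFrom_natCast s dm start hle
    have hfl := PySem.Chars.find_le_length (s.drop start) dm
    have hfg := PySem.Chars.neg_one_le_find (s.drop start) dm
    rw [List.length_drop] at hfl
    by_cases hf : PySem.Chars.find (s.drop start) dm = -1
    · rw [heq, if_pos hf] at h; exact absurd rfl h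
    · rw [heq, if_neg hf]; omega
  · exact absurd (pvFindFrom_past s dm start hgt) h

-- the 'while True: pos = seq_upper.find(dna_motif, start); …' loop of A
def pvFindLoopA (s dm : List Char) (count : Int) (start : Nat) : Int :=
  if PySem.Chars.findFrom s dm (start : Int) none = -1 then count
  else pvFindLoopA s dm (count + 1) ((PySem.Chars.findFrom s dm (start : Int) none).toNat + 1)
termination_by s.length + 1 - start
decreasing_by
  have hb := pvFindFrom_bounds s dm start (by assumption)
  omega

def count_motif (seq : String) (motif : String) : Int :=
  let dm := PySem.Chars.replace motif.toList ['U'] ['T']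
  let s := PySem.Chars.upper seq.toList
  if PySem.Chars.isIn ['N'] dm then
    (PySem.List.pyRange 0 ((s.length : Int) - (dm.length : Int) + 1)).foldl
      (fun count i => if pvInnerA s i (PySem.List.enumerate dm) then count + 1 else count) 0
  else
    pvFindLoopA s dm 0 0

-- ===== PORT B =====
-- all(c == 'N' or seq_upper[i + j] == c for j, c in enumerate(dna_motif))
-- (the index i + j is always in range for i produced by B's loop, so pyGet? returns some)
def pvMatchB (s dm : List Char) (i : Int) : Bool :=
  (PySem.List.enumerate dm).all (fun jc => jc.2 == 'N' || PySem.List.pyGet? s (i + jc.1) == some jc.2)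

def count_motif_alt (seq : String) (motif : String) : Int :=
  let dm := PySem.Chars.replace motif.toList ['U'] ['T']
  let s := PySem.Chars.upper seq.toList
  (PySem.List.pyRange 0 ((s.length : Int) - (dm.length : Int) + 1)).foldl
    (fun count i => if pvMatchB s dm i then count + 1 else count) 0

-- ===== PRECONDITION & SPEC =====
def Spec_count_motif (seq : String) (motif : String) (out : Int) : Prop := out = count_motif_alt seq motif
instance (seq : String) (motif : String) (out : Int) : Decidable (Spec_count_motif seq motif out) := by unfold Spec_count_motif; infer_instance

-- ===== CLAIM (what is proved, stated in full; the proofs are below) =====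
def Claim_equal_count_motif : Prop := ∀ (seq : String) (motif : String), Dom_count_motif seq motif → Spec_count_motif seq motif (count_motif seq motif)

-- ===== LEMMAS AND PROOFS =====

-- pvOcc s dm i: dna_motif literally occurs at position i
def pvOcc (s dm : List Char) (i : Nat) : Bool := dm.isPrefixOf (s.drop i)

-- number of occurrences at positions ≥ start
def pvG (s dm : List Char) (start : Nat) : Nat :=
  (List.range' start (s.length + 1 - start)).countP (pvOcc s dm)

theorem pvInnerA_eq_all (s : List Char) (i : Int) (l : List (Int × Char)) :
    pvInnerA s i l = l.all (fun jc => jc.2 == 'N' || PySem.List.pyGet? s (i + jc.1) == some jc.2) := by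
  induction l with
  | nil => rfl
  | cons jc rest ih =>
    obtain ⟨j, c⟩ := jc
    by_cases hc : c = 'N'
    · simp [pvInnerA, hc, ih]
    · by_cases hg : PySem.List.pyGet? s (i + j) = some c
      · simp [pvInnerA, hc, hg, ih]
      · simp [pvInnerA, hc, hg]

theorem pvPrefixOf_false (dm l : List Char) (h : ¬ dm <+: l) : dm.isPrefixOf l = false := by
  cases hb : dm.isPrefixOf l
  · rfl
  · exact absurd (List.isPrefixOf_iff_prefix.mp hb) h

theorem pvG_empty (s dm : List Char) (start : Nat) (h : s.length < start) : pvG s dm start = 0 := by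
  unfold pvG
  have : s.length + 1 - start = 0 := by omega
  simp [this]

theorem pvG_step (s dm : List Char) (start : Nat) (h : start ≤ s.length) :
    pvG s dm start = (if pvOcc s dm start then 1 else 0) + pvG s dm (start + 1) := by
  unfold pvG
  have h1 : s.length + 1 - start = (s.length + 1 - (start + 1)) + 1 := by omega
  rw [h1, List.range'_succ, List.countP_cons]
  exact Nat.add_comm _ _

theorem pvG_skip (s dm : List Char) (d : Nat) : ∀ (start : Nat),
    (∀ i, start ≤ i → i < start + d → pvOcc s dm i = false) →
    pvG s dm start = pvG s dm (start + d) := by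
  induction d with
  | zero => intro start _; rfl
  | succ d ih =>
    intro start hno
    rcases (by omega : start ≤ s.length ∨ s.length < start) with hle | hgt
    · rw [pvG_step s dm start hle, hno start (le_refl _) (by omega)]
      have := ih (start + 1) (fun i h1 h2 => hno i (by omega) (by omega))
      simpa [Nat.add_assoc, Nat.add_comm 1 d] using this
    · rw [pvG_empty s dm start hgt, pvG_empty s dm (start + (d+1)) (by omega)]

theorem pvNoOcc_of_findFrom_neg (s dm : List Char) (start : Nat) (hle : start ≤ s.length)
    (hneg : PySem.Chars.findFrom s dm (start : Int) none = -1) :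
    ∀ i, start ≤ i → pvOcc s dm i = false := by
  intro i hi
  have hinf := (PySem.Chars.findFrom_natCast_eq_neg_one_iff s dm start hle).mp hneg
  simp only [pvOcc]
  apply pvPrefixOf_false
  intro hpre
  apply hinf
  have hpre' : dm <+: (s.drop start).drop (i - start) := by
    rw [List.drop_drop]
    have : start + (i - start) = i := by omega
    rw [this]; exact hpre
  have hIn : PySem.Chars.isIn dm (s.drop start) = true :=
    (PySem.Chars.exists_prefix_drop_iff_isIn dm (s.drop start)).mp ⟨i - start, hpre'⟩
  exact (PySem.Chars.isIn_iff_infix dm (s.drop start)).mp hIn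

theorem pvFindLoopA_eq (s dm : List Char) : ∀ (fuel start : Nat) (count : Int),
    s.length + 1 - start ≤ fuel →
    pvFindLoopA s dm count start = count + (pvG s dm start : Int) := by
  intro fuel
  induction fuel with
  | zero =>
    intro start count hf
    have hgt : s.length < start := by omega
    rw [pvFindLoopA, if_pos (pvFindFrom_past s dm start hgt), pvG_empty s dm start hgt]
    simp
  | succ fuel ih =>
    intro start count hf
    by_cases hneg : PySem.Chars.findFrom s dm (start : Int) none = -1
    · rw [pvFindLoopA, if_pos hneg]
      rcases (by omega : start ≤ s.length ∨ s.length < start) with hle | hgt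
      · have h0 : pvG s dm start = 0 := by
          unfold pvG
          rw [List.countP_eq_zero]
          intro a ha
          rw [List.mem_range'] at ha
          obtain ⟨k, _, hak⟩ := ha
          simp [pvNoOcc_of_findFrom_neg s dm start hle hneg a (by omega)]
        rw [h0]; simp
      · rw [pvG_empty s dm start hgt]; simp
    · have hb := pvFindFrom_bounds s dm start hneg
      have hle : start ≤ s.length := by omega
      have hspec := PySem.Chars.findFrom_natCast_spec s dm start hle hneg
      set p := (PySem.Chars.findFrom s dm (start : Int) none).toNat with hp
      have hmin : ∀ i, start ≤ i → i < p → pvOcc s dm i = false := by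
        intro i h1 h2
        have := hspec.2.2 i h1 h2
        simp only [pvOcc]
        exact pvPrefixOf_false dm _ this
      have hoccp : pvOcc s dm p = true := by
        simp [pvOcc, List.isPrefixOf_iff_prefix]
        exact hspec.2.1
      have hskip : pvG s dm start = pvG s dm p := by
        have := pvG_skip s dm (p - start) start (fun i h1 h2 => hmin i h1 (by omega))
        have harith : start + (p - start) = p := by omega
        rwa [harith] at this
      have hstep : pvG s dm p = 1 + pvG s dm (p + 1) := by
        rw [pvG_step s dm p hb.2, hoccp]; simp
      rw [pvFindLoopA, if_neg hneg]
      rw [ih (p + 1) (count + 1) (by omega)]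
      rw [hskip, hstep]
      push_cast
      ring

theorem pvNotPrefix_of_short (dm l : List Char) (h : l.length < dm.length) :
    dm.isPrefixOf l = false := by
  apply pvPrefixOf_false
  intro hpre
  have := hpre.length_le
  omega

theorem pvTail (s dm : List Char) :
    (List.range (s.length + 1)).countP (pvOcc s dm)
      = (List.range (((s.length : Int) - (dm.length : Int) + 1).toNat)).countP (pvOcc s dm) := by
  set T := ((s.length : Int) - (dm.length : Int) + 1).toNat with hT
  have hTle : T ≤ s.length + 1 := by omega
  have hsplit : List.range' 0 T ++ List.range' T (s.length + 1 - T) = List.range' 0 (s.length + 1) := by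
    have := @List.range'_append 0 T (s.length + 1 - T) 1
    simpa [Nat.add_sub_cancel' hTle] using this
  rw [List.range_eq_range', List.range_eq_range', ← hsplit, List.countP_append]
  have h0 : (List.range' T (s.length + 1 - T)).countP (pvOcc s dm) = 0 := by
    rw [List.countP_eq_zero]
    intro a ha
    rw [List.mem_range'] at ha
    obtain ⟨k, _, hak⟩ := ha
    have hlen : (s.drop a).length < dm.length := by
      rw [List.length_drop]; omega
    simp [pvOcc, pvNotPrefix_of_short dm (s.drop a) hlen]
  omega

theorem pvN_mem_infix (dm : List Char) (h : 'N' ∈ dm) : ['N'] <:+: dm := by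
  obtain ⟨l₁, l₂, hl⟩ := List.append_of_mem h
  exact ⟨l₁, l₂, by simp [hl]⟩

theorem pvAllEnum (s : List Char) (dm : List Char) (hN : 'N' ∉ dm) : ∀ (base i : Nat),
    i + base + dm.length ≤ s.length →
    (PySem.List.enumerate dm (base : Int)).all
        (fun jc => jc.2 == 'N' || PySem.List.pyGet? s ((i : Int) + jc.1) == some jc.2)
      = dm.isPrefixOf (s.drop (i + base)) := by
  induction dm with
  | nil => intro base i _; simp [PySem.List.enumerate]
  | cons c t ih =>
    intro base i hlen
    have hc : c ≠ 'N' := fun hc => hN (by simp [hc])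
    have hNt : 'N' ∉ t := fun ht => hN (by simp [ht])
    have hib : i + base < s.length := by simp at hlen; omega
    have hcast : (i : Int) + (base : Int) = ((i + base : Nat) : Int) := by push_cast; ring
    have hget : PySem.List.pyGet? s ((i : Int) + (base : Int)) = some s[i + base] := by
      rw [hcast, PySem.List.pyGet?_natCast, List.getElem?_eq_getElem hib]
    have hdrop : s.drop (i + base) = s[i + base] :: s.drop (i + base + 1) :=
      List.drop_eq_getElem_cons hib
    have henum : PySem.List.enumerate (c :: t) (base : Int)
        = ((base : Int), c) :: PySem.List.enumerate t ((base : Int) + 1) := by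
      simp [PySem.List.enumerate]
    have hbase1 : ((base : Int) + 1) = ((base + 1 : Nat) : Int) := by push_cast; ring
    rw [henum, List.all_cons, hdrop]
    have hiht := ih hNt (base + 1) i (by simp at hlen ⊢; omega)
    have harith : i + (base + 1) = i + base + 1 := by omega
    rw [harith] at hiht
    rw [hbase1, hiht]
    simp only [List.isPrefixOf_cons₂]  -- (c :: t).isPrefixOf (x :: xs) = (c == x) && t.isPrefixOf xs
    rw [hget]
    have : (c == 'N') = false := by simp [hc]
    simp only [this, Bool.false_or]
    have hbeq : (some s[i + base] == some c) = (c == s[i + base]) := by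
      rcases eq_or_ne c s[i + base] with h | h
      · simp [h]
      · simp [h, Ne.symm h]
    rw [hbeq]

theorem pvKey (s dm : List Char) :
    (if PySem.Chars.isIn ['N'] dm then
      (PySem.List.pyRange 0 ((s.length : Int) - (dm.length : Int) + 1)).foldl
        (fun count i => if pvInnerA s i (PySem.List.enumerate dm) then count + 1 else count) 0
    else pvFindLoopA s dm 0 0)
    = (PySem.List.pyRange 0 ((s.length : Int) - (dm.length : Int) + 1)).foldl
        (fun count i => if pvMatchB s dm i then count + 1 else count) 0 := by
  by_cases hN : PySem.Chars.isIn ['N'] dm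
  · rw [if_pos hN]
    simp only [pvInnerA_eq_all, pvMatchB]
    rfl
  · rw [if_neg hN]
    have hNmem : 'N' ∉ dm := by
      intro hmem
      exact (PySem.Chars.isIn_eq_false_iff ['N'] dm).mp (by simpa using hN) (pvN_mem_infix dm hmem)
    rw [pvFindLoopA_eq s dm (s.length + 1) 0 0 (by omega)]
    have hG : pvG s dm 0 = (List.range (s.length + 1)).countP (pvOcc s dm) := by
      unfold pvG
      rw [List.range_eq_range']
      simp
    rw [hG, pvTail s dm]
    rw [PySem.List.pyRange_one, PySem.List.foldl_if_add_one, List.countP_map]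
    have hEq : ∀ k ∈ List.range (((s.length : Int) - (dm.length : Int) + 1 - 0).toNat),
        pvOcc s dm k = ((fun i => pvMatchB s dm i) ∘ (fun k : Nat => (0 : Int) + (k : Int))) k := by
      intro k hk
      rw [List.mem_range] at hk
      have hkm : k + 0 + dm.length ≤ s.length := by omega
      simp only [Function.comp_apply, zero_add, pvMatchB]
      have := pvAllEnum s dm hNmem 0 k hkm
      simp only [Nat.add_zero, Nat.cast_zero] at this
      simp [pvOcc, this]
    have hT0 : (((s.length : Int) - (dm.length : Int) + 1 - 0)).toNat
        = (((s.length : Int) - (dm.length : Int) + 1)).toNat := by simp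
    rw [List.countP_congr (fun x hx => by rw [hEq x (by rw [hT0]; exact hx)])]
    simp

-- ===== VERDICT (by name: the statement is the Claim_ definition above) =====
theorem count_motif_spec : Claim_equal_count_motif := by
  intro seq motif _
  unfold Spec_count_motif count_motif count_motif_alt
  exact pvKey (PySem.Chars.upper seq.toList) (PySem.Chars.replace motif.toList ['U'] ['T'])
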